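-- pv_equiv track=rewrite | github.com/vlegchilkin/advent-of-code | aoc/__init__.py | t_minmax
-- ===== SOURCE A (Python) =====
-- def t_minmax(items: list[tuple]):
--     if len(items) == 0:
--         return None
--
--     match len(next(iter(items))):
--         case 1:
--             return min(items), max(items)
--         case 2:
--             return (
--                 (min([item[0] for item in items]), min([item[1] for item in items])),
--                 (max([item[0] for item in items]), max([item[1] for item in items])),
--             )
--         case 3:
--             return (
--                 (min([item[0] for item in items]), min([item[1] for item in items]), min([item[2] for item in items])),
--                 (max([item[0] for item in items]), max([item[1] for item in items]), max([item[2] for item in items])),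
--             )
--         case _:
--             raise ValueError("Not implemented for dimension")
-- ===== SOURCE B (Python) =====
-- def t_minmax(items: list[tuple]):
--     # One uniform transpose-and-reduce instead of three hardcoded per-dimension branches.
--     if not items:
--         return None
--     d = len(next(iter(items)))
--     if d not in (1, 2, 3):
--         raise ValueError("Not implemented for dimension")
--     cols = list(zip(*items))
--     return tuple(min(c) for c in cols), tuple(max(c) for c in cols)
-- ===== Notes on version B (the rewrite author's own statement) =====
-- stated objective: simpler
-- what changed: replaced A's three hardcoded per-dimension branches by one uniform transpose (zip(*items)) followed by a per-column min/max reduction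
-- outside the precondition, e.g. on t_minmax([(1,), (0, 5)]): A returns ((0, 5), (1,)), B returns ((0,), (1,))
import Mathlib
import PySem

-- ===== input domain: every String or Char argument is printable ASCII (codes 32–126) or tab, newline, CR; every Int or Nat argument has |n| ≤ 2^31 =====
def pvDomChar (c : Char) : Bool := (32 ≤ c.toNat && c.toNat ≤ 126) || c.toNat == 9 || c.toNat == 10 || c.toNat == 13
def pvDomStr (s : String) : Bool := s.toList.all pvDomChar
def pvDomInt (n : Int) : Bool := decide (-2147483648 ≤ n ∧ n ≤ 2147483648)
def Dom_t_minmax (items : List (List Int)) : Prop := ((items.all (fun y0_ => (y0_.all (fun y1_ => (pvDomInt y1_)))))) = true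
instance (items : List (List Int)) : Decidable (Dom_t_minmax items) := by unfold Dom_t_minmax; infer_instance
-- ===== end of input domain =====

-- B replaces A's three hardcoded per-dimension branches with one uniform transpose-and-reduce (simpler); equal return values on Pre_.

-- ===== PORT A =====
-- [item[j] for item in items] : none exactly where item[j] raises IndexError
def colA (items : List (List Int)) (j : Int) : Option (List Int) :=
  match items with
  | [] => some []
  | l :: rest =>
    match PySem.List.pyGet? l j, colA rest j with
    | some v, some vs => some (v :: vs)
    | _, _ => none

def t_minmax (items : List (List Int)) : Option (List Int × List Int) :=
  if items.length = 0 then none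
  else
    match items.headI.length with
    | 1 =>
      -- min(items), max(items): lexicographic min/max of the tuples themselves
      match PySem.List.min? items (fun l => l), PySem.List.max? items (fun l => l) with
      | some mn, some mx => some (mn, mx)
      | _, _ => none
    | 2 =>
      match colA items 0, colA items 1 with
      | some c0, some c1 =>
        match PySem.List.min? c0 (fun v => v), PySem.List.min? c1 (fun v => v),
              PySem.List.max? c0 (fun v => v), PySem.List.max? c1 (fun v => v) with
        | some m0, some m1, some M0, some M1 => some ([m0, m1], [M0, M1])
        | _, _, _, _ => none
      | _, _ => none
    | 3 =>
      match colA items 0, colA items 1, colA items 2 with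
      | some c0, some c1, some c2 =>
        match PySem.List.min? c0 (fun v => v), PySem.List.min? c1 (fun v => v), PySem.List.min? c2 (fun v => v),
              PySem.List.max? c0 (fun v => v), PySem.List.max? c1 (fun v => v), PySem.List.max? c2 (fun v => v) with
        | some m0, some m1, some m2, some M0, some M1, some M2 => some ([m0, m1, m2], [M0, M1, M2])
        | _, _, _, _, _, _ => none
      | _, _, _ => none
    | _ => none  -- raise ValueError("Not implemented for dimension")

-- ===== PORT B =====
-- min(c) / max(c) over a nonempty column
def colMin (c : List Int) : Int := c.tail.foldl min c.headI
def colMax (c : List Int) : Int := c.tail.foldl max c.headI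

def t_minmax_alt (items : List (List Int)) : Option (List Int × List Int) :=
  match items with
  | [] => none
  | x :: rest =>
    let d := x.length
    if d = 1 ∨ d = 2 ∨ d = 3 then
      -- cols = list(zip(*items)): zip truncates to the shortest item
      let n := rest.foldl (fun m l => min m l.length) d
      let cols := (List.range n).map (fun j => (x :: rest).map (fun l => l.getD j 0))
      some (cols.map colMin, cols.map colMax)
    else none  -- raise ValueError("Not implemented for dimension")

-- ===== PRECONDITION & SPEC =====
-- Pre_ excludes ragged inputs (first-item dimension d not satisfied by every item, or extra coordinates
-- when d = 1) and dimensions outside {1,2,3}: there A either raises (IndexError/ValueError) or — first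
-- item of length 1 with longer items behind it — returns a lexicographic min/max over the full ragged
-- tuples, an accident of the dim-1 branch; B raises or truncates to the common columns there.
def Pre_t_minmax (items : List (List Int)) : Prop :=
  items = [] ∨
    ((items.headI.length = 1 ∧ ∀ l ∈ items, l.length = 1) ∨
     ((items.headI.length = 2 ∨ items.headI.length = 3) ∧ ∀ l ∈ items, items.headI.length ≤ l.length))
instance (items : List (List Int)) : Decidable (Pre_t_minmax items) := by unfold Pre_t_minmax; infer_instance

def pvWitness_t_minmax : List (List Int) := [[1, 2], [3, 4]]

def Spec_t_minmax (items : List (List Int)) (out : Option (List Int × List Int)) : Prop := out = t_minmax_alt items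
instance (items : List (List Int)) (out : Option (List Int × List Int)) : Decidable (Spec_t_minmax items out) := by unfold Spec_t_minmax; infer_instance

-- ===== CLAIM (what is proved, stated in full; the proofs are below) =====
def Claim_equal_t_minmax : Prop := ∀ (items : List (List Int)), Dom_t_minmax items → Pre_t_minmax items → Spec_t_minmax items (t_minmax items)

-- ===== LEMMAS AND PROOFS =====

theorem lt_sing (a b : Int) : (([a] : List Int) < [b]) ↔ a < b := by
  constructor
  · intro h
    cases h with
    | rel h => exact h
    | cons h => cases h
  · intro h; exact List.Lex.rel h

theorem min?_id_cons_cons {α : Type} [LT α] [DecidableLT α] (m x : α) (xs : List α) :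
    PySem.List.min? (m :: x :: xs) (fun v => v) = PySem.List.min? ((if x < m then x else m) :: xs) (fun v => v) := by
  simp only [PySem.List.min?, List.foldl_cons]
  by_cases h : x < m <;> simp [h]

theorem max?_id_cons_cons {α : Type} [LT α] [DecidableLT α] (m x : α) (xs : List α) :
    PySem.List.max? (m :: x :: xs) (fun v => v) = PySem.List.max? ((if m < x then x else m) :: xs) (fun v => v) := by
  simp only [PySem.List.max?, List.foldl_cons]
  by_cases h : m < x <;> simp [h]

theorem min?_map_sing (xs : List Int) :
    PySem.List.min? (xs.map (fun v => ([v] : List Int))) (fun l => l)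
      = (PySem.List.min? xs (fun v => v)).map (fun v => [v]) := by
  cases xs with
  | nil => rfl
  | cons m t =>
    induction t generalizing m with
    | nil => rfl
    | cons x r ih =>
      have hsing : (if ([x] : List Int) < [m] then ([x] : List Int) else [m]) = [if x < m then x else m] := by
        by_cases h : x < m
        · rw [if_pos ((lt_sing x m).mpr h), if_pos h]
        · rw [if_neg (fun hc => h ((lt_sing x m).mp hc)), if_neg h]
      rw [List.map_cons, List.map_cons, min?_id_cons_cons, hsing, min?_id_cons_cons (α := Int)]
      simpa using ih (if x < m then x else m)

theorem max?_map_sing (xs : List Int) :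
    PySem.List.max? (xs.map (fun v => ([v] : List Int))) (fun l => l)
      = (PySem.List.max? xs (fun v => v)).map (fun v => [v]) := by
  cases xs with
  | nil => rfl
  | cons m t =>
    induction t generalizing m with
    | nil => rfl
    | cons x r ih =>
      have hsing : (if ([m] : List Int) < [x] then ([x] : List Int) else [m]) = [if m < x then x else m] := by
        by_cases h : m < x
        · rw [if_pos ((lt_sing m x).mpr h), if_pos h]
        · rw [if_neg (fun hc => h ((lt_sing m x).mp hc)), if_neg h]
      rw [List.map_cons, List.map_cons, max?_id_cons_cons, hsing, max?_id_cons_cons (α := Int)]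
      simpa using ih (if m < x then x else m)

theorem sing_ext (xs : List (List Int)) (hall : ∀ l ∈ xs, l.length = 1) :
    xs.map (fun l => ([l.getD 0 0] : List Int)) = xs := by
  induction xs with
  | nil => rfl
  | cons l t ih =>
    obtain ⟨a, rfl⟩ := List.length_eq_one_iff.mp (hall l (by simp))
    simp only [List.map_cons]
    rw [ih (fun l hl => hall l (by simp [hl]))]
    rfl

theorem colA_some (j : Nat) (xs : List (List Int)) (hall : ∀ l ∈ xs, j < l.length) :
    colA xs (j : Int) = some (xs.map (fun l => l.getD j 0)) := by
  induction xs with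
  | nil => rfl
  | cons l t ih =>
    have hj : j < l.length := hall l (by simp)
    rw [colA, PySem.List.pyGet?_natCast, List.getElem?_eq_getElem hj,
        ih (fun l hl => hall l (by simp [hl]))]
    simp [List.getD, List.getElem?_eq_getElem hj]

theorem foldl_min_len (d : Nat) (t : List (List Int)) (hall : ∀ l ∈ t, d ≤ l.length) :
    t.foldl (fun m l => min m l.length) d = d := by
  induction t with
  | nil => rfl
  | cons l r ih =>
    rw [List.foldl_cons, min_eq_left (hall l (by simp))]
    exact ih (fun l hl => hall l (by simp [hl]))

-- ===== VERDICT (by name: the statement is the Claim_ definition above) =====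
theorem t_minmax_spec : Claim_equal_t_minmax := by
  intro items _ hpre
  unfold Spec_t_minmax
  match items with
  | [] => rfl
  | x :: t =>
    rcases hpre with h | ⟨h1, hall⟩ | ⟨hd, hall⟩
    · exact absurd h (by simp)
    · -- dimension 1
      simp only [List.headI] at h1 hall
      obtain ⟨a, rfl⟩ := List.length_eq_one_iff.mp h1
      have heq : ([a] :: t).map (fun l => ([l.getD 0 0] : List Int)) = [a] :: t := sing_ext _ hall
      have hmap : ([a] :: t).map (fun l => ([l.getD 0 0] : List Int))
          = (([a] :: t).map (fun l => l.getD 0 0)).map (fun v => [v]) := by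
        simp [List.map_map]
      have hA : t_minmax ([a] :: t)
          = some ([(t.map (fun l => l.getD 0 0)).foldl min a], [(t.map (fun l => l.getD 0 0)).foldl max a]) := by
        rw [t_minmax, if_neg (by simp)]
        simp only [List.headI, List.length_singleton]
        rw [← heq, hmap, min?_map_sing, max?_map_sing]
        simp [PySem.List.min?_id_cons, PySem.List.max?_id_cons]
      have hB : t_minmax_alt ([a] :: t)
          = some ([(t.map (fun l => l.getD 0 0)).foldl min a], [(t.map (fun l => l.getD 0 0)).foldl max a]) := by
        simp only [t_minmax_alt, List.length_singleton]
        rw [foldl_min_len 1 t (fun l hl => le_of_eq (hall l (by simp [hl])).symm)]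
        simp [colMin, colMax]
      rw [hA, hB]
    · -- dimension 2 or 3
      simp only [List.headI] at hd hall
      have h0 : ∀ l ∈ x :: t, 0 < l.length := fun l hl => lt_of_lt_of_le (by rcases hd with h | h <;> omega) (hall l hl)
      have h1 : ∀ l ∈ x :: t, 1 < l.length := fun l hl => lt_of_lt_of_le (by rcases hd with h | h <;> omega) (hall l hl)
      rw [t_minmax, if_neg (by simp)]
      simp only [t_minmax_alt, List.headI]
      rcases hd with hd | hd
      · rw [hd, if_pos (Or.inr (Or.inl rfl)),
            foldl_min_len 2 t (fun l hl => hd ▸ hall l (by simp [hl])),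
            show ((0 : Int) = ((0 : Nat) : Int)) from rfl, show ((1 : Int) = ((1 : Nat) : Int)) from rfl,
            colA_some 0 _ h0, colA_some 1 _ h1]
        simp only [List.map_cons, PySem.List.min?_id_cons, PySem.List.max?_id_cons]
        simp [colMin, colMax, List.range_succ]
      · have h2 : ∀ l ∈ x :: t, 2 < l.length := fun l hl => lt_of_lt_of_le (by omega) (hall l hl)
        rw [hd, if_pos (Or.inr (Or.inr rfl)),
            foldl_min_len 3 t (fun l hl => hd ▸ hall l (by simp [hl])),
            show ((0 : Int) = ((0 : Nat) : Int)) from rfl, show ((1 : Int) = ((1 : Nat) : Int)) from rfl,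
            show ((2 : Int) = ((2 : Nat) : Int)) from rfl,
            colA_some 0 _ h0, colA_some 1 _ h1, colA_some 2 _ h2]
        simp only [List.map_cons, PySem.List.min?_id_cons, PySem.List.max?_id_cons]
        simp [colMin, colMax, List.range_succ]
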